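-- pv_equiv track=rewrite | github.com/anfnn/uir | matr.py | matrica_right
-- ===== SOURCE A (Python) =====
-- def matrica_right(matrix):
--     n = len(matrix)
--     matrix_b = [[0] * (2 * n) for _ in range(n)]
--     for i in range(n):
--         for j in range(n):
--             matrix_b[i][j] = matrix[i][j]
--             matrix_b[i][j+n] = matrix[i][n-j-1]
--     return matrix_b
-- ===== SOURCE B (Python) =====
-- def matrica_right(matrix):
--     # Column-major algorithm: extract the n columns, append the reversed
--     # column list (horizontal mirror = reversed column order), transpose back.
--     n = len(matrix)
--     cols = [[matrix[i][j] for i in range(n)] for j in range(n)]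
--     cols += cols[::-1]
--     return [[c[i] for c in cols] for i in range(n)]
-- ===== Notes on version B (the rewrite author's own statement) =====
-- stated objective: alternative
-- what changed: B is column-major: it extracts the n columns of the matrix, appends the reversed column list (a horizontal mirror is the matrix with column order reversed), and transposes back, instead of A's row-wise nested two-index writes into a pre-allocated n x 2n zero buffer.
import Mathlib
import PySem

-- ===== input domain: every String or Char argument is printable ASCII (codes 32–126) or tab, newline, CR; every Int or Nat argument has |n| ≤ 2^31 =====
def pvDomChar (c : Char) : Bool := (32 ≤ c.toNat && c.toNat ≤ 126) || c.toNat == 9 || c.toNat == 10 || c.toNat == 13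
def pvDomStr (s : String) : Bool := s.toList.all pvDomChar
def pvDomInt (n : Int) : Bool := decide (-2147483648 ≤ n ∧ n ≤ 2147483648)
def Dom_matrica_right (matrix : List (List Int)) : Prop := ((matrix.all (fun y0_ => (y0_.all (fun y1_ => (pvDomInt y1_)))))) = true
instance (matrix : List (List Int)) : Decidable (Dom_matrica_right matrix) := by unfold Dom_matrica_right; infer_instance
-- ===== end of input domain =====

-- B works column-major: it extracts the n columns, appends the reversed column list
-- (a horizontal mirror reverses column order) and transposes back, instead of A's
-- row-wise two-index writes into a pre-allocated zero buffer (objective: alternative).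

-- ===== PORT A =====
-- literal port of A: zero buffer n × 2n, nested loops writing matrix_b[i][j] and matrix_b[i][j+n];
-- i and j come from range(n) so they are nonnegative and .toNat is exact here
def matrica_right (matrix : List (List Int)) : List (List Int) :=
  let n : Int := matrix.length
  let matrix_b : List (List Int) :=
    List.replicate matrix.length (List.replicate (2 * matrix.length) 0)
  (PySem.List.pyRange 0 n 1).foldl (fun mb i =>
    (PySem.List.pyRange 0 n 1).foldl (fun mb j =>
      let mb := mb.modify i.toNat (fun r =>
        r.set j.toNat (PySem.List.pyGetD (PySem.List.pyGetD matrix i []) j 0))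
      mb.modify i.toNat (fun r =>
        r.set (j.toNat + matrix.length)
          (PySem.List.pyGetD (PySem.List.pyGetD matrix i []) (n - j - 1) 0))
    ) mb) matrix_b

-- ===== PORT B =====
-- literal port of B: columns via the double comprehension, cols += cols[::-1], transpose back
def matrica_right_alt (matrix : List (List Int)) : List (List Int) :=
  let n : Int := matrix.length
  let cols : List (List Int) :=
    (PySem.List.pyRange 0 n 1).map (fun j =>
      (PySem.List.pyRange 0 n 1).map (fun i =>
        PySem.List.pyGetD (PySem.List.pyGetD matrix i []) j 0))
  let cols2 := cols ++ ((PySem.List.slice? cols none none (-1)).getD [])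
  (PySem.List.pyRange 0 n 1).map (fun i => cols2.map (fun c => PySem.List.pyGetD c i 0))

-- ===== PRECONDITION & SPEC =====
-- Pre_ excludes exactly the inputs where the Python A raises IndexError: some row shorter than len(matrix)
def Pre_matrica_right (matrix : List (List Int)) : Prop :=
  ∀ row ∈ matrix, matrix.length ≤ row.length
instance (matrix : List (List Int)) : Decidable (Pre_matrica_right matrix) := by
  unfold Pre_matrica_right; infer_instance

def pvWitness_matrica_right : List (List Int) := [[1, 2], [3, 4]]

def Spec_matrica_right (matrix : List (List Int)) (out : List (List Int)) : Prop := out = matrica_right_alt matrix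
instance (matrix : List (List Int)) (out : List (List Int)) : Decidable (Spec_matrica_right matrix out) := by unfold Spec_matrica_right; infer_instance

-- ===== CLAIM (what is proved, stated in full; the proofs are below) =====
def Claim_equal_matrica_right : Prop := ∀ (matrix : List (List Int)), Dom_matrica_right matrix → Pre_matrica_right matrix → Spec_matrica_right matrix (matrica_right matrix)

-- ===== LEMMAS AND PROOFS =====

-- the common per-row value both ports compute from a source row
def pvMirror (n : Nat) (row : List Int) : List Int :=
  row.take n ++ (row.take n).reverse

theorem pv_range_cast (n : Nat) :
    PySem.List.pyRange 0 (n : Int) 1 = (List.range n).map (fun k : Nat => (k : Int)) := by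
  rw [PySem.List.pyRange_one]; simp

theorem pv_set_at_len {α : Type} (xs ys : List α) (y v : α) :
    (xs ++ y :: ys).set xs.length v = xs ++ v :: ys := by
  induction xs with
  | nil => rfl
  | cons a xs ih => simp [ih]

theorem pv_modify_at_len {α : Type} (xs ys : List α) (y : α) (f : α → α) :
    (xs ++ y :: ys).modify xs.length f = xs ++ f y :: ys := by
  induction xs with
  | nil => rfl
  | cons a xs ih => simp [ih]

theorem pv_foldl_two_modify {α : Type} (l : List α) (i : Nat)
    (g₁ g₂ : α → List Int → List Int) (mb : List (List Int)) :
    l.foldl (fun mb x => (mb.modify i (g₁ x)).modify i (g₂ x)) mb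
      = mb.modify i (fun r => l.foldl (fun r x => g₂ x (g₁ x r)) r) := by
  induction l generalizing mb with
  | nil => exact (List.modify_id i mb).symm
  | cons x l ih =>
    rw [List.foldl_cons, ih, List.modify_modify_eq, List.modify_modify_eq]
    rfl

theorem pv_foldl_modify_range (F : Nat → List Int → List Int) (n : Nat) (z : List Int) :
    ∀ m, m ≤ n →
    (List.range m).foldl (fun mb i => mb.modify i (F i)) (List.replicate n z)
      = (List.range m).map (fun i => F i z) ++ List.replicate (n - m) z := by
  intro m hm
  induction m with
  | zero => simp
  | succ m ih =>
    rw [List.range_succ, List.foldl_append, List.map_append, ih (by omega)]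
    have hrep : List.replicate (n - m) z = z :: List.replicate (n - m - 1) z := by
      rw [← List.replicate_succ]; congr 1; omega
    have hlen : ((List.range m).map (fun i => F i z)).length = m := by simp
    have key := pv_modify_at_len (List.map (fun i => F i z) (List.range m))
      (List.replicate (n - m - 1) z) z (F m)
    rw [hlen] at key
    rw [List.foldl_cons, List.foldl_nil, hrep, key]
    simp
    omega

theorem pv_rowfill (row : List Int) (n : Nat) (hn : n ≤ row.length) :
    ∀ m, m ≤ n →
    (List.range m).foldl
      (fun r k => (r.set k (row.getD k 0)).set (k + n) (row.getD (n - k - 1) 0))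
      (List.replicate (2 * n) (0 : Int))
    = ((row.take n).take m ++ List.replicate (n - m) 0)
      ++ ((row.take n).reverse.take m ++ List.replicate (n - m) 0) := by
  intro m hm
  have hT : (row.take n).length = n := by simp [hn]
  induction m with
  | zero =>
    simp
    omega
  | succ m ih =>
    rw [List.range_succ, List.foldl_append, ih (by omega), List.foldl_cons, List.foldl_nil]
    set T := row.take n with hTdef
    set Tm := T.take m with hTm
    set Um := T.reverse.take m with hUm
    have hTml : Tm.length = m := by simp [hTm, hT]; omega
    have hUml : Um.length = m := by simp [hUm, hT]; omega
    have hrep : List.replicate (n - m) (0:Int) = 0 :: List.replicate (n - m - 1) 0 := by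
      rw [← List.replicate_succ]; congr 1; omega
    have e1 : (Tm ++ List.replicate (n - m) (0:Int)) ++ (Um ++ List.replicate (n - m) 0)
        = Tm ++ (0 :: (List.replicate (n - m - 1) 0 ++ (Um ++ List.replicate (n - m) 0))) := by
      rw [hrep]; simp
    have key1 := pv_set_at_len Tm
      (List.replicate (n - m - 1) (0:Int) ++ (Um ++ List.replicate (n - m) 0)) 0 (row.getD m 0)
    rw [hTml] at key1
    rw [e1, key1]
    have e2 : Tm ++ row.getD m 0 :: (List.replicate (n - m - 1) (0:Int) ++ (Um ++ List.replicate (n - m) 0))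
        = (Tm ++ row.getD m 0 :: (List.replicate (n - m - 1) 0 ++ Um)) ++ (0 :: List.replicate (n - m - 1) 0) := by
      rw [hrep]; simp
    have key2 := pv_set_at_len (Tm ++ row.getD m 0 :: (List.replicate (n - m - 1) (0:Int) ++ Um))
      (List.replicate (n - m - 1) (0:Int)) 0 (row.getD (n - m - 1) 0)
    have hl2 : (Tm ++ row.getD m 0 :: (List.replicate (n - m - 1) (0:Int) ++ Um)).length = m + n := by
      simp [hTml, hUml]; omega
    rw [hl2] at key2
    rw [e2, key2]
    have hv1 : row.getD m 0 = T[m]'(by omega) := by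
      rw [List.getD_eq_getElem _ _ (by omega)]
      simp [hTdef]
    have hv2 : row.getD (n - m - 1) 0 = T.reverse[m]'(by simp [hT]; omega) := by
      rw [List.getD_eq_getElem _ _ (by omega)]
      rw [List.getElem_reverse]
      simp [hTdef]
      congr 1
      omega
    have ht1 : T.take (m+1) = Tm ++ [T[m]'(by omega)] := by
      rw [List.take_add_one]
      simp only [List.getElem?_eq_getElem (by omega : m < T.length), Option.toList_some]
      rfl
    have ht2 : T.reverse.take (m+1) = Um ++ [T.reverse[m]'(by simp [hT]; omega)] := by
      rw [List.take_add_one]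
      simp only [List.getElem?_eq_getElem (by simp [hT]; omega : m < T.reverse.length), Option.toList_some]
      rfl
    rw [ht1, ht2, hv1, hv2]
    simp only [List.append_assoc, List.cons_append, List.nil_append]
    have hnm : n - (m + 1) = n - m - 1 := by omega
    rw [hnm]

theorem pv_map_getD_range (row : List Int) (n : Nat) (h : n ≤ row.length) :
    (List.range n).map (fun k => row.getD k 0) = row.take n := by
  apply List.ext_getElem
  · simp [h]
  · intro k h1 h2
    simp at h1 h2
    simp [List.getD_eq_getElem?_getD, List.getElem?_eq_getElem (by omega : k < row.length)]

-- element i of a column built as a map over range n is just the generator at i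
theorem pv_getD_map_range (f : Nat → Int) (n i : Nat) (hi : i < n) :
    ((List.range n).map f).getD i 0 = f i := by
  rw [List.getD_eq_getElem _ _ (by simp [hi])]
  simp

theorem pv_alt_eq (matrix : List (List Int)) (h : Pre_matrica_right matrix) :
    matrica_right_alt matrix
      = (List.range matrix.length).map (fun i => pvMirror matrix.length (matrix.getD i [])) := by
  simp only [matrica_right_alt]
  rw [PySem.List.slice?_none_none_neg_one, Option.getD_some]
  rw [pv_range_cast, List.map_map, List.map_map]
  set n := matrix.length with hn
  apply List.map_congr_left
  intro i hi
  simp only [Function.comp]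
  simp only [List.mem_range] at hi
  have hrow : matrix.getD i [] ∈ matrix := by
    rw [List.getD_eq_getElem _ _ (by omega)]
    exact List.getElem_mem _
  have hlen : n ≤ (matrix.getD i []).length := h _ hrow
  rw [List.map_append, List.map_reverse]
  simp only [List.map_map]
  have this1 : ∀ L : List Int, L = (matrix.getD i []).take n →
      L ++ L.reverse = pvMirror n (matrix.getD i []) := by
    rintro L rfl; rfl
  apply this1
  rw [← pv_map_getD_range (matrix.getD i []) n hlen]
  apply List.map_congr_left
  intro j hj
  simp only [List.mem_range] at hj
  simp only [Function.comp_def, PySem.List.pyGetD_natCast]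
  exact pv_getD_map_range _ n i hi

theorem pv_a_eq (matrix : List (List Int)) (h : Pre_matrica_right matrix) :
    matrica_right matrix
      = (List.range matrix.length).map (fun i => pvMirror matrix.length (matrix.getD i [])) := by
  simp only [matrica_right]
  rw [pv_range_cast, List.foldl_map]
  set n := matrix.length with hn
  rw [PySem.List.foldl_congr_mem
    (g := fun mb (i : Nat) => mb.modify i (fun r => (List.range n).foldl
      (fun r k => (r.set k ((matrix.getD i []).getD k 0)).set (k + n) ((matrix.getD i []).getD (n - k - 1) 0)) r))]
  · rw [pv_foldl_modify_range _ n _ n le_rfl]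
    simp only [Nat.sub_self, List.replicate_zero, List.append_nil]
    apply List.map_congr_left
    intro i hi
    simp only [List.mem_range] at hi
    have hrow : matrix.getD i [] ∈ matrix := by
      rw [List.getD_eq_getElem _ _ (by omega)]
      exact List.getElem_mem _
    have hlen : n ≤ (matrix.getD i []).length := h _ hrow
    have := pv_rowfill (matrix.getD i []) n hlen n le_rfl
    rw [this]
    simp [pvMirror, List.take_take]
  · intro mb i hi
    simp only [List.mem_range] at hi
    rw [List.foldl_map]
    rw [PySem.List.foldl_congr_mem
      (g := fun mb' (j : Nat) => (mb'.modify i (fun r => r.set j ((matrix.getD i []).getD j 0))).modify i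
        (fun r => r.set (j + n) ((matrix.getD i []).getD (n - j - 1) 0)))]
    · rw [pv_foldl_two_modify]
    · intro mb' j hj
      simp only [List.mem_range] at hj
      have hcast : ((n : Int) - (j : Int) - 1) = ((n - j - 1 : Nat) : Int) := by omega
      simp only [Int.toNat_natCast, PySem.List.pyGetD_natCast, hcast]

-- ===== VERDICT (by name: the statement is the Claim_ definition above) =====
theorem matrica_right_spec : Claim_equal_matrica_right := by
  intro matrix _ hpre
  unfold Spec_matrica_right
  rw [pv_alt_eq matrix hpre, pv_a_eq matrix hpre]
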